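-- pv_equiv track=rewrite | github.com/choimartin7/Earnings-Call-Analyzer | improved_finbert_finetuning.py | extract_important_sections
-- ===== SOURCE A (Python) =====
-- def extract_important_sections(text):
--     """
--     Extract the most important parts of the earnings call transcript
--     focusing on CEO/CFO statements, guidance, and financial results.
--     """
--     # Split into sections
--     sections = text.split('\n\n')
--
--     important_sections = []
--     financial_sections = []
--     guidance_sections = []
--     qa_sections = []
--
--     # Keywords to identify important sections
--     financial_keywords = [
--         'revenue', 'earnings', 'profit', 'income', 'margin', 'growth',
--         'billion', 'million', 'quarter', 'fiscal', 'financial',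
--         'EBITDA', 'EPS', 'diluted', 'GAAP', 'non-GAAP'
--     ]
--
--     guidance_keywords = [
--         'outlook', 'guidance', 'expect', 'forecast', 'future',
--         'next quarter', 'coming year', 'anticipate'
--     ]
--
--     executive_speakers = [
--         'CEO', 'Chief Executive Officer', 'CFO', 'Chief Financial Officer',
--         'Chairman', 'President'
--     ]
--
--     for section in sections:
--         lower_section = section.lower()
--
--         # Check if this is an executive speaking
--         is_executive_speaking = any(title in section for title in executive_speakers)
--
--         # Check if this contains financial information
--         has_financial_info = any(keyword in lower_section for keyword in financial_keywords)
--
--         # Check if this contains guidance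
--         has_guidance = any(keyword in lower_section for keyword in guidance_keywords)
--
--         # Check if this is part of Q&A
--         is_qa = 'question' in lower_section or 'analyst' in lower_section
--
--         # Prioritize sections
--         if has_guidance:
--             guidance_sections.append(section)
--         elif has_financial_info:
--             financial_sections.append(section)
--         elif is_executive_speaking:
--             important_sections.append(section)
--         elif is_qa:
--             qa_sections.append(section)
--
--     # Prioritize sections in this order: guidance, financial, executive statements, Q&A
--     all_important_sections = guidance_sections + financial_sections + important_sections + qa_sections
--
--     # If we found important sections, join them together
--     if all_important_sections:
--         return ' '.join(all_important_sections)
--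
--     # If we couldn't find any important sections, return the original text
--     return text
-- ===== SOURCE B (Python) =====
-- def extract_important_sections(text):
--     """Staged filtering: four successive comprehension passes over the sections,
--     one per priority class, with earlier-class matches excluded explicitly
--     (instead of A's single dispatch loop into four bucket lists)."""
--     financial_keywords = [
--         'revenue', 'earnings', 'profit', 'income', 'margin', 'growth',
--         'billion', 'million', 'quarter', 'fiscal', 'financial',
--         'EBITDA', 'EPS', 'diluted', 'GAAP', 'non-GAAP'
--     ]
--     guidance_keywords = [
--         'outlook', 'guidance', 'expect', 'forecast', 'future',
--         'next quarter', 'coming year', 'anticipate'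
--     ]
--     executive_speakers = [
--         'CEO', 'Chief Executive Officer', 'CFO', 'Chief Financial Officer',
--         'Chairman', 'President'
--     ]
--
--     def is_guid(s):
--         low = s.lower()
--         return any(k in low for k in guidance_keywords)
--
--     def is_fin(s):
--         low = s.lower()
--         return any(k in low for k in financial_keywords)
--
--     def is_exec(s):
--         return any(t in s for t in executive_speakers)
--
--     def is_qa(s):
--         low = s.lower()
--         return 'question' in low or 'analyst' in low
--
--     sections = text.split('\n\n')
--     preds = [
--         is_guid,
--         lambda s: is_fin(s) and not is_guid(s),
--         lambda s: is_exec(s) and not is_fin(s) and not is_guid(s),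
--         lambda s: is_qa(s) and not is_exec(s) and not is_fin(s) and not is_guid(s),
--     ]
--     picked = [s for p in preds for s in sections if p(s)]
--     if not picked:
--         return text
--     return ' '.join(picked)
-- ===== Notes on version B (the rewrite author's own statement) =====
-- stated objective: alternative
-- what changed: A makes one pass dispatching each section into four bucket lists via an elif chain and concatenates the buckets; B makes four staged filter passes over the sections, one per priority class, each pass re-testing the section and explicitly excluding matches of higher-priority classes, flattening the passes directly into the output list.
import Mathlib
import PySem

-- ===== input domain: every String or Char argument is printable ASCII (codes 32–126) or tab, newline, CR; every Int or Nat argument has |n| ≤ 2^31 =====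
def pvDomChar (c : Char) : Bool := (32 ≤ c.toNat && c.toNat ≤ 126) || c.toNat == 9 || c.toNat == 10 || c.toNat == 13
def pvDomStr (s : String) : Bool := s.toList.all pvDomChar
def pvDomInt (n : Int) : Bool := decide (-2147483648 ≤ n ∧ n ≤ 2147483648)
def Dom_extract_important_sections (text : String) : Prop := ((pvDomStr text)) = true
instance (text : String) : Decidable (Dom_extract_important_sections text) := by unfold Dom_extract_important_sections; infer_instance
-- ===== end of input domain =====

-- B replaces A's single dispatch loop into four bucket lists by four staged filter
-- passes over the sections, one per priority class (objective: alternative decomposition).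

-- Keyword lists (identical literals in both Python versions)
def pvFinancialKeywords : List String :=
  ["revenue", "earnings", "profit", "income", "margin", "growth",
   "billion", "million", "quarter", "fiscal", "financial",
   "EBITDA", "EPS", "diluted", "GAAP", "non-GAAP"]

def pvGuidanceKeywords : List String :=
  ["outlook", "guidance", "expect", "forecast", "future",
   "next quarter", "coming year", "anticipate"]

def pvExecutiveSpeakers : List String :=
  ["CEO", "Chief Executive Officer", "CFO", "Chief Financial Officer",
   "Chairman", "President"]

-- ===== PORT A =====
-- A's loop body: dispatch one section into the four bucket lists
-- state = (important, financial, guidance, qa)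
def pvStepA (st : List String × List String × List String × List String) (sec : String) :
    List String × List String × List String × List String :=
  let (imp, fin, gui, qa) := st
  let lowerSec := PySem.Str.lower sec
  let isExecutiveSpeaking := pvExecutiveSpeakers.any (fun t => PySem.Str.isIn t sec)
  let hasFinancialInfo := pvFinancialKeywords.any (fun k => PySem.Str.isIn k lowerSec)
  let hasGuidance := pvGuidanceKeywords.any (fun k => PySem.Str.isIn k lowerSec)
  let isQa := PySem.Str.isIn "question" lowerSec || PySem.Str.isIn "analyst" lowerSec
  if hasGuidance then (imp, fin, gui ++ [sec], qa)
  else if hasFinancialInfo then (imp, fin ++ [sec], gui, qa)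
  else if isExecutiveSpeaking then (imp ++ [sec], fin, gui, qa)
  else if isQa then (imp, fin, gui, qa ++ [sec])
  else (imp, fin, gui, qa)

def extract_important_sections (text : String) : String :=
  let sections := (PySem.Str.split? text "\n\n").getD []   -- sep is a nonempty literal, split? is always some
  let st := sections.foldl pvStepA ([], [], [], [])
  let allImportant := st.2.2.1 ++ st.2.1 ++ st.1 ++ st.2.2.2
  if allImportant ≠ [] then PySem.Str.join " " allImportant else text

-- ===== PORT B =====
-- Source B's four class predicates
def pvIsGuid (s : String) : Bool :=
  pvGuidanceKeywords.any (fun k => PySem.Str.isIn k (PySem.Str.lower s))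

def pvIsFin (s : String) : Bool :=
  pvFinancialKeywords.any (fun k => PySem.Str.isIn k (PySem.Str.lower s))

def pvIsExec (s : String) : Bool :=
  pvExecutiveSpeakers.any (fun t => PySem.Str.isIn t s)

def pvIsQa (s : String) : Bool :=
  PySem.Str.isIn "question" (PySem.Str.lower s) || PySem.Str.isIn "analyst" (PySem.Str.lower s)

def extract_important_sections_alt (text : String) : String :=
  let sections := (PySem.Str.split? text "\n\n").getD []
  let preds : List (String → Bool) :=
    [pvIsGuid,
     fun s => pvIsFin s && !pvIsGuid s,
     fun s => pvIsExec s && !pvIsFin s && !pvIsGuid s,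
     fun s => pvIsQa s && !pvIsExec s && !pvIsFin s && !pvIsGuid s]
  let picked := preds.flatMap (fun p => sections.filter p)
  if picked = [] then text else PySem.Str.join " " picked

-- ===== PRECONDITION & SPEC =====
def Spec_extract_important_sections (text : String) (out : String) : Prop := out = extract_important_sections_alt text
instance (text : String) (out : String) : Decidable (Spec_extract_important_sections text out) := by unfold Spec_extract_important_sections; infer_instance

-- ===== CLAIM (what is proved, stated in full; the proofs are below) =====
def Claim_equal_extract_important_sections : Prop := ∀ (text : String), Dom_extract_important_sections text → Spec_extract_important_sections text (extract_important_sections text)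

-- ===== LEMMAS AND PROOFS =====

-- proof-side rank function characterizing A's elif chain
def pvRank? (s : String) : Option Nat :=
  if pvIsGuid s then some 0
  else if pvIsFin s then some 1
  else if pvIsExec s then some 2
  else if pvIsQa s then some 3
  else none

def pvBucket (j : Nat) (ss : List String) : List String :=
  ss.filter (fun s => pvRank? s == some j)

theorem pvStepA_eq (st : List String × List String × List String × List String) (s : String) :
    pvStepA st s =
      match pvRank? s with
      | some 0 => (st.1, st.2.1, st.2.2.1 ++ [s], st.2.2.2)
      | some 1 => (st.1, st.2.1 ++ [s], st.2.2.1, st.2.2.2)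
      | some 2 => (st.1 ++ [s], st.2.1, st.2.2.1, st.2.2.2)
      | some 3 => (st.1, st.2.1, st.2.2.1, st.2.2.2 ++ [s])
      | _ => st := by
  obtain ⟨imp, fin, gui, qa⟩ := st
  simp only [pvStepA, pvRank?, pvIsGuid, pvIsFin, pvIsExec, pvIsQa]
  split_ifs <;> rfl

theorem pvFoldA_eq (ss : List String)
    (imp fin gui qa : List String) :
    ss.foldl pvStepA (imp, fin, gui, qa) =
      (imp ++ pvBucket 2 ss, fin ++ pvBucket 1 ss, gui ++ pvBucket 0 ss, qa ++ pvBucket 3 ss) := by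
  induction ss generalizing imp fin gui qa with
  | nil => simp [pvBucket]
  | cons s t ih =>
    simp only [List.foldl_cons, pvStepA_eq]
    rcases hr : pvRank? s with _ | r
    · simp [ih, pvBucket, hr]
    · have h4 : r < 4 := by
        simp only [pvRank?] at hr
        split_ifs at hr <;> simp_all <;> omega
      interval_cases r <;> simp [ih, pvBucket, hr]

-- B's staged predicates pick out exactly the rank buckets
theorem pvPred0 (s : String) : (pvRank? s == some 0) = pvIsGuid s := by
  simp only [pvRank?]; split_ifs <;> simp_all

theorem pvPred1 (s : String) : (pvRank? s == some 1) = (pvIsFin s && !pvIsGuid s) := by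
  simp only [pvRank?]; split_ifs <;> simp_all

theorem pvPred2 (s : String) :
    (pvRank? s == some 2) = (pvIsExec s && !pvIsFin s && !pvIsGuid s) := by
  simp only [pvRank?]; split_ifs <;> simp_all

theorem pvPred3 (s : String) :
    (pvRank? s == some 3) = (pvIsQa s && !pvIsExec s && !pvIsFin s && !pvIsGuid s) := by
  simp only [pvRank?]; split_ifs <;> simp_all

-- ===== VERDICT (by name: the statement is the Claim_ definition above) =====
theorem extract_important_sections_spec : Claim_equal_extract_important_sections := by
  intro text _
  unfold Spec_extract_important_sections extract_important_sections extract_important_sections_alt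
  set ss := (PySem.Str.split? text "\n\n").getD [] with hss
  clear_value ss
  have e0 : ss.filter pvIsGuid = pvBucket 0 ss :=
    (List.filter_congr (l := ss) (fun s _ => pvPred0 s)).symm
  have e1 : ss.filter (fun s => pvIsFin s && !pvIsGuid s) = pvBucket 1 ss :=
    (List.filter_congr (l := ss) (fun s _ => pvPred1 s)).symm
  have e2 : ss.filter (fun s => pvIsExec s && !pvIsFin s && !pvIsGuid s) = pvBucket 2 ss :=
    (List.filter_congr (l := ss) (fun s _ => pvPred2 s)).symm
  have e3 : ss.filter (fun s => pvIsQa s && !pvIsExec s && !pvIsFin s && !pvIsGuid s) = pvBucket 3 ss :=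
    (List.filter_congr (l := ss) (fun s _ => pvPred3 s)).symm
  simp only [pvFoldA_eq ss [] [] [] [], List.nil_append, List.flatMap_cons, List.flatMap_nil,
    List.append_nil, e0, e1, e2, e3]
  by_cases h : pvBucket 0 ss ++ (pvBucket 1 ss ++ (pvBucket 2 ss ++ pvBucket 3 ss)) = []
  · rw [if_pos h, if_neg (by simp only [List.append_assoc]; simpa using h)]
  · rw [if_neg h, if_pos (by simp only [List.append_assoc]; simpa using h)]
    simp only [List.append_assoc]
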